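-- pv_equiv track=rewrite | github.com/shivam-parashar/PDF_X | sqlite_version/extractor.py | burst
-- ===== SOURCE A (Python) =====
-- def burst(patent):
--     words = patent.split()
--     w = []
--     for word in words:
--         a = word.split(':')
--         for b in a:
--             if(b!=""):
--                 w.append(b.strip())
--     return w;
-- ===== SOURCE B (Python) =====
-- def burst(patent):
--     return patent.replace(':', ' ').split()
-- ===== Notes on version B (the rewrite author's own statement) =====
-- stated objective: simpler
-- what changed: Replaces A's nested loop (split on whitespace, then split each word on ':', filter empties, strip) by a normalize-then-tokenize decomposition: turn every colon into a space and do one whitespace split, which drops empty tokens by itself.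
import Mathlib
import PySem

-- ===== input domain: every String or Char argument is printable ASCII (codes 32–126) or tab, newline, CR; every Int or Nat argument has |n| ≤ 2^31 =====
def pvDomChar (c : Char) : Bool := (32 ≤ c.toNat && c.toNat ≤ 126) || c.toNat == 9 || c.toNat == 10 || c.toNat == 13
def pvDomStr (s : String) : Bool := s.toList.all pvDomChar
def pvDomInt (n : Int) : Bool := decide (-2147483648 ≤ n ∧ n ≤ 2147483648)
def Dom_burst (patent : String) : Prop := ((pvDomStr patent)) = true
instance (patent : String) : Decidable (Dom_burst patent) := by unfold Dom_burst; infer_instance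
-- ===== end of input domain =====

-- B replaces A's nested split/filter/strip loops with a normalize-then-tokenize decomposition
-- (turn every ':' into ' ', then one whitespace split); objective: simpler.

-- ===== PORT A =====
def burst (patent : String) : List String :=
  let words := PySem.Str.split₀ patent
  words.foldl (fun w word =>
    -- word.split(':'): split? is `some …` because the separator ":" is non-empty
    let a := (PySem.Str.split? word ":").getD []
    a.foldl (fun w b => if b ≠ "" then w ++ [PySem.Str.strip b] else w) w) []

-- ===== PORT B =====
def burst_alt (patent : String) : List String :=
  PySem.Str.split₀ (PySem.Str.replace patent ":" " ")

-- ===== PRECONDITION & SPEC =====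
def Spec_burst (patent : String) (out : List String) : Prop := out = burst_alt patent
instance (patent : String) (out : List String) : Decidable (Spec_burst patent out) := by unfold Spec_burst; infer_instance

-- ===== CLAIM (what is proved, stated in full; the proofs are below) =====
def Claim_equal_burst : Prop := ∀ (patent : String), Dom_burst patent → Spec_burst patent (burst patent)

-- ===== LEMMAS AND PROOFS =====

-- the common semantics: maximal runs of non-delimiter characters
def pvTokens (d : Char → Bool) : List Char → List (List Char)
  | [] => []
  | c :: rest =>
    if d c then pvTokens d rest
    else (c :: rest.takeWhile (fun x => !d x)) :: pvTokens d (rest.dropWhile (fun x => !d x))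
termination_by l => l.length
decreasing_by
  · simp
  · have := List.length_dropWhile_le (fun x => !d x) rest; simp; omega

def pvDelim (c : Char) : Bool := PySem.Chars.isspace c || c == ':'
def pvColonToSpace (c : Char) : Char := if c = ':' then ' ' else c

lemma pvTokens_run (d : Char → Bool) (s : List Char) :
    pvTokens d s =
      (if s.takeWhile (fun x => !d x) = [] then [] else [s.takeWhile (fun x => !d x)]) ++
        pvTokens d (s.dropWhile (fun x => !d x)) := by
  cases s with
  | nil => simp [pvTokens]
  | cons c t =>
    by_cases h : d c
    · simp [List.takeWhile_cons, List.dropWhile_cons, h]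
    · simp [pvTokens, List.takeWhile_cons, List.dropWhile_cons, h]

lemma pv_split₀_go (s : List Char) : ∀ (cur : List Char) (acc : List (List Char)),
    PySem.Chars.split₀.go s cur acc =
      acc.reverse ++
        (if cur.reverse ++ s.takeWhile (fun x => !PySem.Chars.isspace x) = [] then []
         else [cur.reverse ++ s.takeWhile (fun x => !PySem.Chars.isspace x)]) ++
        pvTokens PySem.Chars.isspace (s.dropWhile (fun x => !PySem.Chars.isspace x)) := by
  induction s with
  | nil =>
    intro cur acc
    rw [PySem.Chars.split₀.go]
    by_cases h : cur = [] <;> simp [h, pvTokens]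
  | cons c rest ih =>
    intro cur acc
    rw [PySem.Chars.split₀.go]
    by_cases h : PySem.Chars.isspace c
    · have hstep : pvTokens PySem.Chars.isspace (c :: rest) =
          (if rest.takeWhile (fun x => !PySem.Chars.isspace x) = [] then []
           else [rest.takeWhile (fun x => !PySem.Chars.isspace x)]) ++
            pvTokens PySem.Chars.isspace (rest.dropWhile (fun x => !PySem.Chars.isspace x)) := by
        rw [show pvTokens PySem.Chars.isspace (c :: rest) = pvTokens PySem.Chars.isspace rest from
          by simp [pvTokens, h]]
        exact pvTokens_run _ _
      simp only [h, if_true]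
      cases cur with
      | nil =>
        simp only [List.isEmpty_nil, if_true]
        rw [ih [] acc]
        simp [hstep, h, List.takeWhile_cons, List.dropWhile_cons]
      | cons a b =>
        simp only [List.isEmpty_cons, if_false, Bool.false_eq_true]
        rw [ih [] ((a :: b).reverse :: acc)]
        simp [hstep, h, List.takeWhile_cons, List.dropWhile_cons, List.append_assoc]
    · simp only [h, if_false, Bool.false_eq_true]
      rw [ih (c :: cur) acc]
      simp [h, List.takeWhile_cons, List.dropWhile_cons, List.append_assoc]

lemma pv_split₀_eq (s : List Char) :
    PySem.Chars.split₀ s = pvTokens PySem.Chars.isspace s := by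
  rw [PySem.Chars.split₀, pv_split₀_go]
  simp only [List.reverse_nil, List.nil_append, List.filter_nil]
  exact (pvTokens_run _ _).symm

lemma pv_splitOn_go (c0 : Char) (s : List Char) :
    ∀ (fuel : Nat), s.length ≤ fuel → ∀ (cur : List Char) (acc : List (List Char)),
    (PySem.Chars.splitOn.go [c0] fuel s cur acc).filter (fun t => !t.isEmpty) =
      (acc.reverse.filter (fun t => !t.isEmpty)) ++
        (if cur.reverse ++ s.takeWhile (fun x => !(x == c0)) = [] then []
         else [cur.reverse ++ s.takeWhile (fun x => !(x == c0))]) ++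
        pvTokens (fun x => x == c0) (s.dropWhile (fun x => !(x == c0))) := by
  induction s with
  | nil =>
    intro fuel _ cur acc
    cases fuel with
    | zero =>
      rw [PySem.Chars.splitOn.go]
      by_cases h : cur = [] <;> simp [h, pvTokens, List.filter_append]
    | succ n =>
      rw [PySem.Chars.splitOn.go]
      all_goals try omega
      by_cases h : cur = [] <;> simp [h, pvTokens, List.filter_append]
  | cons c rest ih =>
    intro fuel hfuel cur acc
    cases fuel with
    | zero => simp at hfuel
    | succ f =>
      rw [PySem.Chars.splitOn.go]
      by_cases hc : c = c0
      · subst hc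
        have hstep : pvTokens (fun x => x == c) (c :: rest) =
            (if rest.takeWhile (fun x => !(x == c)) = [] then []
             else [rest.takeWhile (fun x => !(x == c))]) ++
              pvTokens (fun x => x == c) (rest.dropWhile (fun x => !(x == c))) := by
          rw [show pvTokens (fun x => x == c) (c :: rest) = pvTokens (fun x => x == c) rest from
            by simp [pvTokens]]
          exact pvTokens_run _ _
        have hpre : [c].isPrefixOf (c :: rest) = true := by simp [List.isPrefixOf]
        rw [hpre, if_pos rfl]
        simp only [List.length_cons] at hfuel
        rw [show List.drop [c].length (c :: rest) = rest from by simp]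
        rw [ih f (by omega) [] (cur.reverse :: acc)]
        by_cases hcur : cur = [] <;>
          simp [hstep, hcur, List.takeWhile_cons, List.dropWhile_cons,
            List.filter_append, List.append_assoc]
      · have hpre : [c0].isPrefixOf (c :: rest) = false := by
          simp only [List.isPrefixOf, Bool.and_eq_false_imp, List.isPrefixOf_nil_left]
          simp [beq_eq_false_iff_ne, Ne.symm hc]
        rw [hpre, if_neg (by simp)]
        simp only [List.length_cons] at hfuel
        rw [ih f (by omega) (c :: cur) acc]
        simp [hc, List.takeWhile_cons, List.dropWhile_cons, List.append_assoc]

lemma pv_splitOn_eq (c0 : Char) (s : List Char) :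
    (PySem.Chars.splitOn s [c0]).filter (fun t => !t.isEmpty) =
      pvTokens (fun x => x == c0) s := by
  rw [PySem.Chars.splitOn, pv_splitOn_go c0 s (s.length + 1) (by omega)]
  simp only [List.reverse_nil, List.nil_append, List.filter_nil]
  exact (pvTokens_run _ _).symm

lemma pv_replace_go (s : List Char) :
    ∀ (fuel : Nat), s.length ≤ fuel → ∀ (acc : List Char),
    PySem.Chars.replace.go [':'] [' '] fuel s acc = acc.reverse ++ s.map pvColonToSpace := by
  induction s with
  | nil =>
    intro fuel _ acc
    cases fuel with
    | zero => rw [PySem.Chars.replace.go]; simp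
    | succ n =>
      rw [PySem.Chars.replace.go]
      all_goals try omega
      simp
  | cons c t ih =>
    intro fuel hfuel acc
    cases fuel with
    | zero => simp at hfuel
    | succ f =>
      simp only [List.length_cons] at hfuel
      rw [PySem.Chars.replace.go]
      by_cases hc : c = ':'
      · subst hc
        rw [show [':'].isPrefixOf (':' :: t) = true from by simp [List.isPrefixOf], if_pos rfl]
        rw [show List.drop [':'].length (':' :: t) = t from by simp]
        rw [ih f (by omega) ([' '].reverse ++ acc)]
        simp [pvColonToSpace]
      · rw [show [':'].isPrefixOf (c :: t) = false from by
          simp only [List.isPrefixOf, List.isPrefixOf_nil_left, Bool.and_true]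
          simp [Ne.symm hc]]
        rw [if_neg (by simp)]
        rw [ih f (by omega) (c :: acc)]
        simp [pvColonToSpace, hc]

lemma pv_replace_eq (s : List Char) :
    PySem.Chars.replace s [':'] [' '] = s.map pvColonToSpace := by
  rw [PySem.Chars.replace]
  simpa using pv_replace_go s s.length le_rfl []

lemma pvTokens_map (d : Char → Bool) (g : Char → Char) :
    ∀ (n : Nat) (s : List Char), s.length ≤ n →
    pvTokens d (s.map g) = (pvTokens (fun c => d (g c)) s).map (List.map g) := by
  intro n
  induction n with
  | zero =>
    intro s hs
    have hs0 : s = [] := List.length_eq_zero_iff.mp (by omega)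
    subst hs0
    simp [pvTokens]
  | succ n ih =>
    intro s hs
    cases s with
    | nil => simp [pvTokens]
    | cons c t =>
      simp only [List.length_cons] at hs
      by_cases h : d (g c)
      · rw [List.map_cons,
          show pvTokens d (g c :: t.map g) = pvTokens d (t.map g) from by simp [pvTokens, h],
          show pvTokens (fun c => d (g c)) (c :: t) = pvTokens (fun c => d (g c)) t from by
            simp [pvTokens, h]]
        exact ih t (by omega)
      · rw [List.map_cons,
          show pvTokens d (g c :: t.map g) =
            (g c :: (t.map g).takeWhile (fun x => !d x)) ::
              pvTokens d ((t.map g).dropWhile (fun x => !d x)) from by simp [pvTokens, h],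
          show pvTokens (fun c => d (g c)) (c :: t) =
            (c :: t.takeWhile (fun x => !d (g x))) ::
              pvTokens (fun c => d (g c)) (t.dropWhile (fun x => !d (g x))) from by
            simp [pvTokens, h]]
        rw [List.takeWhile_map, List.dropWhile_map]
        rw [ih (t.dropWhile ((fun x => !d x) ∘ g)) (by
          have := List.length_dropWhile_le ((fun x => !d x) ∘ g) t; omega)]
        simp [Function.comp_def]

lemma pvTokens_chars (d : Char → Bool) :
    ∀ (n : Nat) (s : List Char), s.length ≤ n →
    ∀ t ∈ pvTokens d s, ∀ x ∈ t, d x = false := by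
  intro n
  induction n with
  | zero =>
    intro s hs
    have hs0 : s = [] := List.length_eq_zero_iff.mp (by omega)
    subst hs0
    simp [pvTokens]
  | succ n ih =>
    intro s hs
    cases s with
    | nil => simp [pvTokens]
    | cons c t =>
      simp only [List.length_cons] at hs
      by_cases h : d c
      · rw [show pvTokens d (c :: t) = pvTokens d t from by simp [pvTokens, h]]
        exact ih t (by omega)
      · rw [show pvTokens d (c :: t) =
            (c :: t.takeWhile (fun x => !d x)) ::
              pvTokens d (t.dropWhile (fun x => !d x)) from by simp [pvTokens, h]]
        intro tok htok x hx
        rcases List.mem_cons.mp htok with rfl | htok'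
        · rcases List.mem_cons.mp hx with rfl | hx'
          · simpa using h
          · simpa using List.mem_takeWhile_imp hx'
        · exact ih (t.dropWhile (fun x => !d x))
            (by have := List.length_dropWhile_le (fun x => !d x) t; omega) tok htok' x hx

lemma pvTokens_subset (d : Char → Bool) :
    ∀ (n : Nat) (s : List Char), s.length ≤ n →
    ∀ t ∈ pvTokens d s, ∀ x ∈ t, x ∈ s := by
  intro n
  induction n with
  | zero =>
    intro s hs
    have hs0 : s = [] := List.length_eq_zero_iff.mp (by omega)
    subst hs0
    simp [pvTokens]
  | succ n ih =>
    intro s hs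
    cases s with
    | nil => simp [pvTokens]
    | cons c t =>
      simp only [List.length_cons] at hs
      by_cases h : d c
      · rw [show pvTokens d (c :: t) = pvTokens d t from by simp [pvTokens, h]]
        intro tok htok x hx
        exact List.mem_cons_of_mem c (ih t (by omega) tok htok x hx)
      · rw [show pvTokens d (c :: t) =
            (c :: t.takeWhile (fun x => !d x)) ::
              pvTokens d (t.dropWhile (fun x => !d x)) from by simp [pvTokens, h]]
        intro tok htok x hx
        rcases List.mem_cons.mp htok with rfl | htok'
        · rcases List.mem_cons.mp hx with rfl | hx'
          · exact List.mem_cons_self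
          · exact List.mem_cons_of_mem c ((List.takeWhile_sublist _).subset hx')
        · exact List.mem_cons_of_mem c ((List.dropWhile_sublist _).subset
            (ih (t.dropWhile (fun x => !d x))
              (by have := List.length_dropWhile_le (fun x => !d x) t; omega) tok htok' x hx))

lemma pv_takeWhile_all (p : Char → Bool) (l : List Char) (h : ∀ a ∈ l, p a = true) :
    l.takeWhile p = l := by
  induction l with
  | nil => rfl
  | cons a t ih =>
    rw [List.takeWhile_cons, if_pos (h a (by simp))]
    rw [ih (fun x hx => h x (by simp [hx]))]

lemma pv_dropWhile_all (p : Char → Bool) (l : List Char) (h : ∀ a ∈ l, p a = true) :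
    l.dropWhile p = [] := by
  induction l with
  | nil => rfl
  | cons a t ih =>
    rw [List.dropWhile_cons, if_pos (h a (by simp))]
    exact ih (fun x hx => h x (by simp [hx]))

lemma pv_dropWhile_congr (p q : Char → Bool) (l : List Char) (h : ∀ a ∈ l, p a = q a) :
    l.dropWhile p = l.dropWhile q := by
  induction l with
  | nil => rfl
  | cons a t ih =>
    rw [List.dropWhile_cons, List.dropWhile_cons, h a (by simp)]
    rw [ih (fun x hx => h x (by simp [hx]))]

lemma pv_dropWhile_head (p : Char → Bool) (l : List Char) :
    l.dropWhile p = [] ∨ ∃ b t', l.dropWhile p = b :: t' ∧ p b = false := by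
  induction l with
  | nil => exact Or.inl rfl
  | cons a t ih =>
    rw [List.dropWhile_cons]
    by_cases h : p a
    · simpa [h] using ih
    · exact Or.inr ⟨a, t, by simp [h], by simpa using h⟩

lemma pvTokens_flat (d1 d2 : Char → Bool) :
    ∀ (n : Nat) (s : List Char), s.length ≤ n →
    (pvTokens d1 s).flatMap (pvTokens d2) = pvTokens (fun c => d1 c || d2 c) s := by
  intro n
  induction n with
  | zero =>
    intro s hs
    have hs0 : s = [] := List.length_eq_zero_iff.mp (by omega)
    subst hs0
    simp [pvTokens]
  | succ n ih =>
    intro s hs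
    cases s with
    | nil => simp [pvTokens]
    | cons c rest =>
      simp only [List.length_cons] at hs
      have hAB : rest.takeWhile (fun x => !d1 x) ++ rest.dropWhile (fun x => !d1 x) = rest :=
        List.takeWhile_append_dropWhile
      have hlenA : (rest.takeWhile (fun x => !d1 x)).length ≤ rest.length :=
        (List.takeWhile_sublist _).length_le
      have hlenB : (rest.dropWhile (fun x => !d1 x)).length ≤ rest.length :=
        List.length_dropWhile_le _ _
      have hmemA : ∀ a ∈ rest.takeWhile (fun x => !d1 x), d1 a = false := by
        intro a ha; simpa using List.mem_takeWhile_imp ha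
      have hBhead : rest.dropWhile (fun x => !d1 x) = [] ∨
          ∃ b t', rest.dropWhile (fun x => !d1 x) = b :: t' ∧ d1 b = true := by
        rcases pv_dropWhile_head (fun x => !d1 x) rest with h | ⟨b, t', hbt, hb⟩
        · exact Or.inl h
        · exact Or.inr ⟨b, t', hbt, by simpa using hb⟩
      have hflatpref : ∀ (X : List Char) (L : List (List Char)),
          ((if X = [] then [] else [X]) ++ L).flatMap (pvTokens d2) =
            pvTokens d2 X ++ L.flatMap (pvTokens d2) := by
        intro X L; by_cases hX : X = [] <;> simp [hX, pvTokens]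
      by_cases h1 : d1 c
      · rw [show pvTokens d1 (c :: rest) = pvTokens d1 rest from by simp [pvTokens, h1],
          show pvTokens (fun c => d1 c || d2 c) (c :: rest) =
            pvTokens (fun c => d1 c || d2 c) rest from by simp [pvTokens, h1]]
        exact ih rest (by omega)
      · by_cases h2 : d2 c
        · rw [show pvTokens d1 (c :: rest) =
              (c :: rest.takeWhile (fun x => !d1 x)) ::
                pvTokens d1 (rest.dropWhile (fun x => !d1 x)) from by simp [pvTokens, h1],
            show pvTokens (fun c => d1 c || d2 c) (c :: rest) =
              pvTokens (fun c => d1 c || d2 c) rest from by simp [pvTokens, h1, h2]]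
          rw [List.flatMap_cons,
            show pvTokens d2 (c :: rest.takeWhile (fun x => !d1 x)) =
              pvTokens d2 (rest.takeWhile (fun x => !d1 x)) from by simp [pvTokens, h2]]
          rw [← ih rest (by omega), pvTokens_run d1 rest, hflatpref]
        · -- both not delimiters: a joint token starts at c
          have hlenAB : (rest.takeWhile (fun x => !d1 x)).length +
              (rest.dropWhile (fun x => !d1 x)).length = rest.length := by
            conv_rhs => rw [← hAB]
            rw [List.length_append]
          rw [show pvTokens d1 (c :: rest) =
              (c :: rest.takeWhile (fun x => !d1 x)) ::
                pvTokens d1 (rest.dropWhile (fun x => !d1 x)) from by simp [pvTokens, h1],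
            show pvTokens (fun c => d1 c || d2 c) (c :: rest) =
              (c :: rest.takeWhile (fun x => !(d1 x || d2 x))) ::
                pvTokens (fun c => d1 c || d2 c)
                  (rest.dropWhile (fun x => !(d1 x || d2 x))) from by simp [pvTokens, h1, h2]]
          rw [List.flatMap_cons,
            show pvTokens d2 (c :: rest.takeWhile (fun x => !d1 x)) =
              (c :: (rest.takeWhile (fun x => !d1 x)).takeWhile (fun x => !d2 x)) ::
                pvTokens d2 ((rest.takeWhile (fun x => !d1 x)).dropWhile (fun x => !d2 x)) from by
              simp [pvTokens, h2]]
          have hhead : (rest.takeWhile (fun x => !d1 x)).takeWhile (fun x => !d2 x) =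
              rest.takeWhile (fun x => !(d1 x || d2 x)) := by
            rw [List.takeWhile_takeWhile]
            congr 1
            funext a
            cases hd1 : d1 a <;> cases hd2 : d2 a <;> simp [hd1, hd2]
          set A2 := (rest.takeWhile (fun x => !d1 x)).dropWhile (fun x => !d2 x) with hA2def
          have hmemA2 : ∀ a ∈ A2, d1 a = false := fun a ha =>
            hmemA a ((List.dropWhile_sublist _).subset ha)
          have hlenA2 : A2.length ≤ (rest.takeWhile (fun x => !d1 x)).length :=
            List.length_dropWhile_le _ _
          have hA2congr : (rest.takeWhile (fun x => !d1 x)).dropWhile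
              (fun x => !(d1 x || d2 x)) = A2 := by
            rw [hA2def]
            apply pv_dropWhile_congr
            intro a ha
            simp [hmemA a ha]
          have hBdw : (rest.dropWhile (fun x => !d1 x)).dropWhile (fun x => !(d1 x || d2 x)) =
              rest.dropWhile (fun x => !d1 x) := by
            rcases hBhead with hB0 | ⟨b, t', hbt, hb⟩
            · rw [hB0]; rfl
            · rw [hbt, List.dropWhile_cons]; simp [hb]
          have hdwrest : rest.dropWhile (fun x => !(d1 x || d2 x)) =
              A2 ++ rest.dropWhile (fun x => !d1 x) := by
            conv_lhs => rw [← hAB, List.dropWhile_append, hA2congr]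
            by_cases hA2 : A2.isEmpty
            · rw [if_pos hA2, hBdw, List.isEmpty_iff.mp hA2, List.nil_append]
            · rw [if_neg hA2]
          rw [hhead, hdwrest]
          rw [← ih (A2 ++ rest.dropWhile (fun x => !d1 x)) (by
            rw [List.length_append]; omega)]
          have htwA2B : (A2 ++ rest.dropWhile (fun x => !d1 x)).takeWhile (fun x => !d1 x) = A2 := by
            rw [List.takeWhile_append]
            rw [pv_takeWhile_all _ _ (by intro a ha; simp [hmemA2 a ha])]
            rcases hBhead with hB0 | ⟨b, t', hbt, hb⟩
            · simp [hB0]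
            · simp [hbt, List.takeWhile_cons, hb]
          have hdwA2B : (A2 ++ rest.dropWhile (fun x => !d1 x)).dropWhile (fun x => !d1 x) =
              rest.dropWhile (fun x => !d1 x) := by
            rw [List.dropWhile_append]
            rw [pv_dropWhile_all _ _ (by intro a ha; simp [hmemA2 a ha])]
            rcases hBhead with hB0 | ⟨b, t', hbt, hb⟩
            · simp [hB0]
            · simp [hbt, List.dropWhile_cons, hb]
          rw [pvTokens_run d1 (A2 ++ rest.dropWhile (fun x => !d1 x)), htwA2B, hdwA2B, hflatpref]
          simp

lemma pv_strip_id (cs : List Char) (h : ∀ x ∈ cs, PySem.Chars.isspace x = false) :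
    PySem.Chars.strip cs = cs := by
  have h1 : ∀ (l : List Char), (∀ x ∈ l, PySem.Chars.isspace x = false) →
      List.dropWhile PySem.Chars.isspace l = l := by
    intro l hl
    cases l with
    | nil => rfl
    | cons a t => simp [List.dropWhile_cons, hl a (by simp)]
  rw [PySem.Chars.strip, PySem.Chars.lstrip, PySem.Chars.rstrip, h1 cs h]
  rw [h1 cs.reverse (by intro x hx; exact h x (by simpa using hx))]
  simp

lemma pv_burst_eq (patent : String) :
    burst patent = (pvTokens pvDelim patent.toList).map String.ofList := by
  have hinner : ∀ (a w : List String),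
      a.foldl (fun w b => if b ≠ "" then w ++ [PySem.Str.strip b] else w) w =
        w ++ ((a.filter (fun b => !(b == ""))).map PySem.Str.strip) := by
    intro a w
    rw [show (fun (w : List String) b => if b ≠ "" then w ++ [PySem.Str.strip b] else w) =
        (fun (w : List String) b => if (fun b => !(b == "")) b = true
          then w ++ [PySem.Str.strip b] else w) from by
      funext w b; by_cases h : b = "" <;> simp [h]]
    exact PySem.List.foldl_append_if _ _ a w
  have houter : burst patent = (PySem.Str.split₀ patent).flatMap
      (fun word => (((PySem.Str.split? word ":").getD []).filter
        (fun b => !(b == ""))).map PySem.Str.strip) := by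
    rw [burst]
    rw [show (fun (w : List String) word =>
        ((PySem.Str.split? word ":").getD []).foldl
          (fun w b => if b ≠ "" then w ++ [PySem.Str.strip b] else w) w) =
        (fun (w : List String) word => w ++ (((PySem.Str.split? word ":").getD []).filter
          (fun b => !(b == ""))).map PySem.Str.strip) from by
      funext w word; exact hinner _ w]
    rw [PySem.List.foldl_append_eq_flatMap]
    simp
  rw [houter]
  have hsplit : ∀ w : String, (PySem.Str.split? w ":").getD [] =
      (PySem.Chars.splitOn w.toList [':']).map String.ofList := by
    intro w
    rw [PySem.Str.split?, show (":" : String).toList = [':'] from rfl, PySem.Chars.split?]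
    simp
  have hofnil : ∀ cs : List Char, (String.ofList cs = "") ↔ cs = [] := by
    intro cs
    constructor
    · intro h
      have := congrArg String.toList h
      simpa using this
    · intro h; simp [h]
  have hword : ∀ w : String,
      (((PySem.Str.split? w ":").getD []).filter (fun b => !(b == ""))).map PySem.Str.strip =
        ((pvTokens (fun x => x == ':') w.toList).map
          (fun cs => String.ofList (PySem.Chars.strip cs))) := by
    intro w
    rw [hsplit w, List.filter_map,
      show ((fun (b : String) => !(b == "")) ∘ String.ofList) = (fun t => !t.isEmpty) from by
        funext cs
        by_cases h : cs = []
        · simp [h]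
        · have h1 : (String.ofList cs == "") = false :=
            beq_eq_false_iff_ne.mpr (fun hc => h ((hofnil cs).mp hc))
          have h2 : cs.isEmpty = false := by simp [h]
          simp [Function.comp, h1, h2],
      pv_splitOn_eq, List.map_map]
    congr 1
    funext cs
    simp [PySem.Str.strip, Function.comp]
  rw [show (fun word => (((PySem.Str.split? word ":").getD []).filter
        (fun b => !(b == ""))).map PySem.Str.strip) =
      (fun word => ((pvTokens (fun x => x == ':') word.toList).map
        (fun cs => String.ofList (PySem.Chars.strip cs)))) from by
    funext w; exact hword w]
  rw [PySem.Str.split₀, pv_split₀_eq, List.flatMap_map]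
  have hstripid : ∀ w ∈ pvTokens PySem.Chars.isspace patent.toList,
      ((pvTokens (fun x => x == ':') ((String.ofList w).toList)).map
        (fun cs => String.ofList (PySem.Chars.strip cs))) =
      (pvTokens (fun x => x == ':') w).map String.ofList := by
    intro w hw
    rw [String.toList_ofList]
    apply List.map_congr_left
    intro t ht
    congr 1
    apply pv_strip_id
    intro x hx
    exact pvTokens_chars PySem.Chars.isspace patent.toList.length patent.toList le_rfl w hw x
      (pvTokens_subset (fun x => x == ':') w.length w le_rfl t ht x hx)
  rw [List.flatMap_congr hstripid]
  rw [← List.map_flatMap]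
  rw [pvTokens_flat PySem.Chars.isspace (fun x => x == ':')
    patent.toList.length patent.toList le_rfl]
  rfl

lemma pv_burst_alt_eq (patent : String) :
    burst_alt patent = (pvTokens pvDelim patent.toList).map String.ofList := by
  rw [burst_alt, PySem.Str.split₀]
  congr 1
  rw [pv_split₀_eq, PySem.Str.toList_replace,
    show (":" : String).toList = [':'] from rfl, show (" " : String).toList = [' '] from rfl,
    pv_replace_eq,
    pvTokens_map PySem.Chars.isspace pvColonToSpace patent.toList.length patent.toList le_rfl,
    show (fun c => PySem.Chars.isspace (pvColonToSpace c)) = pvDelim from by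
      funext a
      by_cases h : a = ':' <;> simp [pvColonToSpace, pvDelim, h] <;> rfl]
  conv_rhs => rw [← List.map_id (pvTokens pvDelim patent.toList)]
  apply List.map_congr_left
  intro t ht
  rw [show List.map pvColonToSpace t = List.map id t from by
    apply List.map_congr_left
    intro x hx
    have hx' : pvDelim x = false :=
      pvTokens_chars pvDelim patent.toList.length patent.toList le_rfl t ht x hx
    have : (x == ':') = false := by
      cases hor : (x == ':')
      · rfl
      · exfalso; simp [pvDelim, hor] at hx'
    simp [pvColonToSpace]
    intro hcol
    simp [hcol] at this]
  simp

-- ===== VERDICT (by name: the statement is the Claim_ definition above) =====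
theorem burst_spec : Claim_equal_burst := by
  intro patent _
  unfold Spec_burst
  rw [pv_burst_eq, pv_burst_alt_eq]
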